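-- pv_equiv track=rewrite | github.com/PKULiuHui/LiveBlogSum | model/Model3.py | seq_split
-- ===== SOURCE A (Python) =====
-- def seq_split(vecs, seq_lens):
--     rst = []
--     start = 0
--     for seq_len in seq_lens:
--         rst.append(vecs[start: start + seq_len])
--         start += seq_len
--     assert start == len(vecs)
--     return rst
-- ===== SOURCE B (Python) =====
-- def seq_split(vecs, seq_lens):
--     if not seq_lens:
--         assert not vecs
--         return []
--     l = seq_lens[0]
--     head, rest = vecs[:l], vecs[l:]
--     assert len(head) == l
--     return [head] + seq_split(rest, seq_lens[1:])
-- ===== Notes on version B (the rewrite author's own statement) =====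
-- stated objective: alternative
-- what changed: Replaces the indexed single pass (a running start offset slicing into the original list) by structural recursion that physically consumes the list: peel the head chunk off the front with take/drop, check its length, and recurse on the remainder, no offsets maintained at all.
-- outside the precondition, e.g. on seq_split([1, 2, 3, 4], [3, -1, 2]): A returns [[1, 2, 3], [], [3, 4]], B raises AssertionError
import Mathlib
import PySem

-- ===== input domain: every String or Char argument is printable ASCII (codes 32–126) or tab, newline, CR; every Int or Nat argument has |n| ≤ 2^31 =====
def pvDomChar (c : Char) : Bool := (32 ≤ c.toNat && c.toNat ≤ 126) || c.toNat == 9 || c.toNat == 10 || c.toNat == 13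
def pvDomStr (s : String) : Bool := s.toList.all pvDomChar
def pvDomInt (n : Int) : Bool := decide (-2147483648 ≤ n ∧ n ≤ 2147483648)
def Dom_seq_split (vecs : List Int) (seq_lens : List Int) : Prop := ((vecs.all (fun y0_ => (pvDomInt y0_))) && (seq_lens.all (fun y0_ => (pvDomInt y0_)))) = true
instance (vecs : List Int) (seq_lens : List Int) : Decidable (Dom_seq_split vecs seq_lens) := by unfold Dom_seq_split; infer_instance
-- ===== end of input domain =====

-- B replaces the indexed pass (a running start offset slicing the original list) by
-- structural recursion that consumes the list: peel the head chunk with take/drop and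
-- recurse on the remainder, checking each chunk's length; RETURN-value equivalence (neither mutates).

-- ===== PORT A =====
def seq_split (vecs : List Int) (seq_lens : List Int) : List (List Int) :=
  -- rst = []; start = 0; for seq_len in seq_lens: rst.append(vecs[start:start+seq_len]); start += seq_len
  (seq_lens.foldl
    (fun (st : List (List Int) × Int) seq_len =>
      (st.1 ++ [PySem.List.slice vecs (some st.2) (some (st.2 + seq_len))], st.2 + seq_len))
    ([], 0)).1
  -- the final 'assert start == len(vecs)' is Pre_seq_split

-- ===== PORT B =====
def seq_split_alt (vecs : List Int) (seq_lens : List Int) : List (List Int) :=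
  match seq_lens with
  | [] => []   -- 'assert not vecs' is Pre_seq_split
  | l :: ls =>
      -- head = vecs[:l]; rest = vecs[l:]; 'assert len(head) == l' always holds inside Pre_seq_split
      PySem.List.slice vecs none (some l) ::
        seq_split_alt (PySem.List.slice vecs (some l) none) ls

-- ===== PRECONDITION & SPEC =====
-- Pre_ excludes (a) mismatched totals, on which A's (and B's) asserts raise AssertionError,
-- and (b) negative chunk lengths, on which A still returns but the chunks are accidental
-- artefacts of Python's negative-slice-index arithmetic (B's chunk-length assert raises there).
def Pre_seq_split (vecs : List Int) (seq_lens : List Int) : Prop :=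
  (∀ l ∈ seq_lens, 0 ≤ l) ∧ seq_lens.sum = (vecs.length : Int)
instance (vecs : List Int) (seq_lens : List Int) : Decidable (Pre_seq_split vecs seq_lens) := by
  unfold Pre_seq_split; infer_instance
def pvWitness_seq_split : List Int × List Int := ([5, -3, 7], [1, 2])

def Spec_seq_split (vecs : List Int) (seq_lens : List Int) (out : List (List Int)) : Prop := out = seq_split_alt vecs seq_lens
instance (vecs : List Int) (seq_lens : List Int) (out : List (List Int)) : Decidable (Spec_seq_split vecs seq_lens out) := by unfold Spec_seq_split; infer_instance

-- ===== CLAIM (what is proved, stated in full; the proofs are below) =====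
def Claim_equal_seq_split : Prop := ∀ (vecs : List Int) (seq_lens : List Int), Dom_seq_split vecs seq_lens → Pre_seq_split vecs seq_lens → Spec_seq_split vecs seq_lens (seq_split vecs seq_lens)

-- ===== LEMMAS AND PROOFS =====
-- A's fold over `seq_lens` at natural offset `s` computes `acc` followed by B's recursion
-- on the `s`-dropped suffix, for nonnegative lengths.
theorem seq_split_fold_eq_alt (seq_lens : List Int) (vecs : List Int)
    (acc : List (List Int)) (s : Nat) (h : ∀ l ∈ seq_lens, 0 ≤ l) :
    (seq_lens.foldl
      (fun (st : List (List Int) × Int) seq_len =>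
        (st.1 ++ [PySem.List.slice vecs (some st.2) (some (st.2 + seq_len))], st.2 + seq_len))
      (acc, (s : Int))).1
    = acc ++ seq_split_alt (vecs.drop s) seq_lens := by
  induction seq_lens generalizing acc s with
  | nil => simp [seq_split_alt]
  | cons l ls ih =>
      have hl : 0 ≤ l := h l (by simp)
      have hls : ∀ x ∈ ls, 0 ≤ x := fun x hx => h x (by simp [hx])
      simp only [List.foldl_cons]
      have hcast : (s : Int) + l = ((s + l.toNat : Nat) : Int) := by
        push_cast; omega
      rw [hcast, ih _ _ hls]
      have h1 : PySem.List.slice vecs (some (s : Int)) (some ((s + l.toNat : Nat) : Int))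
          = PySem.List.slice (vecs.drop s) none (some l) := by
        rw [PySem.List.slice_to (vecs.drop s) hl]
        have := PySem.List.slice_natCast vecs s (s + l.toNat)
        simpa using this
      have h2 : vecs.drop (s + l.toNat) = PySem.List.slice (vecs.drop s) (some l) none := by
        rw [PySem.List.slice_from (vecs.drop s) hl, List.drop_drop]
      rw [h1, h2]
      simp [seq_split_alt]

-- ===== VERDICT (by name: the statement is the Claim_ definition above) =====
theorem seq_split_spec : Claim_equal_seq_split := by
  intro vecs seq_lens _ hpre
  unfold Spec_seq_split seq_split
  have := seq_split_fold_eq_alt seq_lens vecs [] 0 hpre.1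
  simpa using this
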